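-- pv_equiv track=rewrite | github.com/aays/twitbot | twitbotcode.py | tweetTruncate
-- ===== SOURCE A (Python) =====
-- def tweetTruncate(tweet_string):
--     substr = ''
--     i1 = 0
--     i2 = 0
--     final_tweet = ''
--     for index in range(len(tweet_string)):
--         if tweet_string[index:index+6] == 'People':
--             i1 = index
--     tweet_string = tweet_string[0:i1]
--     return(tweet_string)
-- ===== SOURCE B (Python) =====
-- def tweetTruncate(tweet_string):
--     # Scan backward from the last possible start of 'People'; first hit is the
--     # last occurrence, so truncate there.  No match (or match at 0) gives ''.
--     for index in range(len(tweet_string) - 6, -1, -1):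
--         if tweet_string[index:index+6] == 'People':
--             return tweet_string[:index]
--     return ''
-- ===== Notes on version B (the rewrite author's own statement) =====
-- stated objective: alternative
-- what changed: B scans backward from the last possible match position and returns at the first hit, instead of A's full forward pass that keeps overwriting the last-seen index and slices afterwards.
import Mathlib
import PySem

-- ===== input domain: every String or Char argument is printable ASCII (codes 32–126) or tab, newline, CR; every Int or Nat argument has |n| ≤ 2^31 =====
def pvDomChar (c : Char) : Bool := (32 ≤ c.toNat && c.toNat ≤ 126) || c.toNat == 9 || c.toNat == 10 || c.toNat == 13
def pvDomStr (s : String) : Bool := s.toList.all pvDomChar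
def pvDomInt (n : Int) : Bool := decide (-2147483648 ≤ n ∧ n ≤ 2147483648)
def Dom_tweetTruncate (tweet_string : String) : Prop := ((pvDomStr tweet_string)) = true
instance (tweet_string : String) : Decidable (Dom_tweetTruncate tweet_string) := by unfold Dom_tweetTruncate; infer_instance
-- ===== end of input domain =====

-- B replaces A's full forward pass (overwrite last-seen index, slice afterwards) by a
-- backward scan from the last possible match position with early exit (objective: alternative).

-- ===== PORT A =====
-- A: for index in range(len(s)): if s[index:index+6] == 'People': i1 = index; return s[0:i1]
def tweetTruncate (tweet_string : String) : String :=
  let cs := tweet_string.toList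
  let i1 : Int :=
    (PySem.List.pyRange 0 (PySem.List.len cs) 1).foldl
      (fun acc index =>
        if PySem.List.slice cs (some index) (some (index + 6)) = "People".toList then index
        else acc) 0
  String.ofList (PySem.List.slice cs (some 0) (some i1))

-- ===== PORT B =====
-- B: for index in range(len(s)-6, -1, -1): if s[index:index+6]=='People': return s[:index]; return ''
-- backward loop ported as structural count-down recursion on the index
def tweetTruncateGo (cs : List Char) (index : Nat) : String :=
  if PySem.List.slice cs (some (index : Int)) (some ((index : Int) + 6)) = "People".toList then
    String.ofList (PySem.List.slice cs none (some (index : Int)))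
  else
    match index with
    | 0 => ""
    | j + 1 => tweetTruncateGo cs j

def tweetTruncate_alt (tweet_string : String) : String :=
  let cs := tweet_string.toList
  if 6 ≤ cs.length then tweetTruncateGo cs (cs.length - 6) else ""

-- ===== PRECONDITION & SPEC =====
def Spec_tweetTruncate (tweet_string : String) (out : String) : Prop := out = tweetTruncate_alt tweet_string
instance (tweet_string : String) (out : String) : Decidable (Spec_tweetTruncate tweet_string out) := by unfold Spec_tweetTruncate; infer_instance

-- ===== CLAIM (what is proved, stated in full; the proofs are below) =====
def Claim_equal_tweetTruncate : Prop := ∀ (tweet_string : String), Dom_tweetTruncate tweet_string → Spec_tweetTruncate tweet_string (tweetTruncate tweet_string)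

-- ===== LEMMAS AND PROOFS =====

-- last index k < m with P k, else 0 (the value A's forward loop leaves in i1)
def pvLm (P : Nat → Prop) [DecidablePred P] (m : Nat) : Nat :=
  (List.range m).foldl (fun acc k => if P k then k else acc) 0

theorem pvLm_succ (P : Nat → Prop) [DecidablePred P] (m : Nat) :
    pvLm P (m + 1) = if P m then m else pvLm P m := by
  simp [pvLm, List.range_succ]

-- pushing Int casts through A's foldl
theorem pvFoldl_cast (P : Nat → Prop) [DecidablePred P] (l : List Nat) (a : Nat) :
    l.foldl (fun acc k => if P k then (k : Int) else acc) (a : Int)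
      = ((l.foldl (fun acc k => if P k then k else acc) a : Nat) : Int) := by
  induction l generalizing a with
  | nil => rfl
  | cons x xs ih =>
    simp only [List.foldl_cons]
    by_cases h : P x <;> simp [h, ih]

-- extending the range over positions where P fails does not move the last match
theorem pvLm_stable (P : Nat → Prop) [DecidablePred P] (m j : Nat)
    (h : ∀ k, m ≤ k → P k → False) : pvLm P (m + j) = pvLm P m := by
  induction j with
  | zero => rfl
  | succ j ih =>
    rw [show m + (j + 1) = (m + j) + 1 from rfl, pvLm_succ]
    have : ¬ P (m + j) := fun hp => h _ (Nat.le_add_right m j) hp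
    simp [this, ih]

-- the backward scan returns the prefix up to the last match ≤ its start index (or "")
theorem pvGo_eq (cs : List Char) (i : Nat) :
    tweetTruncateGo cs i
      = String.ofList (cs.take (pvLm (fun k => (cs.drop k).take 6 = "People".toList) (i + 1))) := by
  induction i with
  | zero =>
    have hs := PySem.List.slice_natCast_add cs 0 6
    simp only [Nat.cast_ofNat] at hs
    rw [tweetTruncateGo, pvLm_succ, hs]
    by_cases h : (cs.drop 0).take 6 = "People".toList
    · rw [if_pos h, if_pos h, PySem.List.slice_to_natCast]
    · rw [if_neg h, if_neg h]
      simp [pvLm]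
  | succ j ih =>
    have hs := PySem.List.slice_natCast_add cs (j + 1) 6
    simp only [Nat.cast_ofNat] at hs
    rw [tweetTruncateGo, pvLm_succ, hs]
    by_cases h : (cs.drop (j + 1)).take 6 = "People".toList
    · rw [if_pos h, if_pos h, PySem.List.slice_to_natCast]
    · rw [if_neg h, if_neg h]
      exact ih

-- no match can start within 6 of the end
theorem pvNoMatch_near_end (cs : List Char) (k : Nat) (hk : cs.length < k + 6)
    (h : (cs.drop k).take 6 = "People".toList) : False := by
  have hlen := congrArg List.length h
  simp [List.length_take, List.length_drop] at hlen
  omega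

theorem pvMain (cs : List Char) :
    String.ofList (PySem.List.slice cs (some 0)
      (some ((PySem.List.pyRange 0 (PySem.List.len cs) 1).foldl
        (fun acc index =>
          if PySem.List.slice cs (some index) (some (index + 6)) = "People".toList then index
          else acc) 0)))
      = (if 6 ≤ cs.length then tweetTruncateGo cs (cs.length - 6) else "") := by
  have hP : ∀ (k : Nat),
      (PySem.List.slice cs (some (k : Int)) (some ((k : Int) + 6)) = "People".toList)
        ↔ ((cs.drop k).take 6 = "People".toList) := by
    intro k
    have hs := PySem.List.slice_natCast_add cs k 6
    push_cast at hs
    rw [hs]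
  set P : Nat → Prop := fun k => (cs.drop k).take 6 = "People".toList with hPdef
  have hA : (PySem.List.pyRange 0 (PySem.List.len cs) 1).foldl
      (fun acc index =>
        if PySem.List.slice cs (some index) (some (index + 6)) = "People".toList then index
        else acc) (0 : Int)
      = ((pvLm P cs.length : Nat) : Int) := by
    rw [PySem.List.len_eq, PySem.List.pyRange_zero_natCast, List.foldl_map]
    have hfun : (fun (x : Int) (y : Nat) =>
        if PySem.List.slice cs (some (y : Int)) (some ((y : Int) + 6)) = "People".toList
        then (y : Int) else x)
        = (fun (x : Int) (y : Nat) => if P y then (y : Int) else x) := by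
      funext x y
      simp only [hP y, hPdef]
    rw [hfun]
    exact_mod_cast pvFoldl_cast P (List.range cs.length) 0
  rw [hA]
  have hslice : PySem.List.slice cs (some 0) (some ((pvLm P cs.length : Nat) : Int))
      = cs.take (pvLm P cs.length) := by
    rw [PySem.List.slice_zero_start, PySem.List.slice_to_natCast]
  rw [hslice]
  by_cases h6 : 6 ≤ cs.length
  · have hsplit : cs.length = (cs.length - 6 + 1) + (cs.length - (cs.length - 5)) := by omega
    have hlm : pvLm P cs.length = pvLm P (cs.length - 6 + 1) := by
      conv_lhs => rw [hsplit]
      exact pvLm_stable P _ _ (fun k hk hkP => pvNoMatch_near_end cs k (by omega) hkP)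
    rw [if_pos h6, pvGo_eq]
    exact congrArg (fun n => String.ofList (List.take n cs)) hlm
  · have hz : pvLm P cs.length = 0 := by
      have hst := pvLm_stable P 0 cs.length (fun k hk hkP => pvNoMatch_near_end cs k (by omega) hkP)
      simpa [pvLm] using hst
    rw [if_neg h6, hz]
    simp

-- ===== VERDICT (by name: the statement is the Claim_ definition above) =====
theorem tweetTruncate_spec : Claim_equal_tweetTruncate := by
  intro s _
  unfold Spec_tweetTruncate tweetTruncate tweetTruncate_alt
  exact pvMain s.toList
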